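-- pv_equiv track=rewrite | github.com/NeuronActivation/ultimate-brainfuck | py/main.py | convert_to_brainfuck
-- ===== SOURCE A (Python) =====
-- def decrement(bfc):
--     return {
--         ']': '[',
--         '[': ',',
--         ',': '.',
--         '.': '-',
--         '-': '+',
--         '+': '<',
--         '<': '>',
--         '>': ']'
--     }.get(bfc, ' ')
--
-- def convert_to_brainfuck(parsed):
--     brainfuck = ""
--     counter = 0
--
--     for c in parsed:
--         current_char = c
--         for _ in range(counter):
--             current_char = decrement(current_char)
--         brainfuck += current_char
--         counter += 1
--     return brainfuck
-- ===== SOURCE B (Python) =====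
-- CYCLE = "][,.-+<>"
--
-- def convert_to_brainfuck(parsed):
--     out = []
--     for i, c in enumerate(parsed):
--         if i == 0:
--             out.append(c)
--         elif c in CYCLE:
--             out.append(CYCLE[(CYCLE.index(c) + i) % 8])
--         else:
--             out.append(' ')
--     return ''.join(out)
-- ===== Notes on version B (the rewrite author's own statement) =====
-- stated objective: faster
-- what changed: Replaced the per-character inner loop of i decrement steps by a single O(1) lookup exploiting the period-8 cycle of decrement: the i-th character's image is CYCLE[(index+i)%8] for cycle characters, a space otherwise (first character unchanged).
import Mathlib
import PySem

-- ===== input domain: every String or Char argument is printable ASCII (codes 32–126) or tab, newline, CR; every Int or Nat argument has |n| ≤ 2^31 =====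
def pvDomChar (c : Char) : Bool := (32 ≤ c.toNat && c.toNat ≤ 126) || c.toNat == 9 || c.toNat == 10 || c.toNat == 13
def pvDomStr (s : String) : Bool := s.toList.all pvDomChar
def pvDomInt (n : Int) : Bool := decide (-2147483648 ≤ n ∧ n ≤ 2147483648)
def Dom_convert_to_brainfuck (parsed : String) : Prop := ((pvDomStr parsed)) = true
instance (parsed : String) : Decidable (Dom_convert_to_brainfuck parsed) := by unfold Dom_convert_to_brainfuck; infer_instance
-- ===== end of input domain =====

-- B replaces A's O(n^2) repeated-decrement inner loop by an O(1) period-8 cycle lookup per character (objective: faster, asymptotic).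

-- ===== PORT A =====
-- dict literal of decrement
def pvDecDict : PySem.Dict Char Char :=
  PySem.Dict.ofList [(']','['), ('[',','), (',','.'), ('.','-'), ('-','+'), ('+','<'), ('<','>'), ('>',']')]

def decrement (bfc : Char) : Char := PySem.Dict.getD pvDecDict bfc ' '

-- 'for _ in range(counter): current_char = decrement(current_char)'
def pvApplyDec : Nat → Char → Char
  | 0, c => c
  | n + 1, c => pvApplyDec n (decrement c)

-- the main 'for c in parsed' loop, carrying (brainfuck, counter)
def pvLoopA : List Char → List Char → Nat → List Char
  | [], bf, _ => bf
  | c :: rest, bf, counter => pvLoopA rest (bf ++ [pvApplyDec counter c]) (counter + 1)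

def convert_to_brainfuck (parsed : String) : String :=
  String.mk (pvLoopA parsed.toList [] 0)

-- ===== PORT B =====
-- CYCLE = "][,.-+<>"
def pvCycle : List Char := [']', '[', ',', '.', '-', '+', '<', '>']

-- the branch body of Source B's loop at enumerate index i
def pvStepB (i : Int) (c : Char) : Char :=
  if i = 0 then c
  else if c ∈ pvCycle then
    PySem.List.pyGetD pvCycle (PySem.Int.mod ((pvCycle.idxOf c : Int) + i) 8) ' '
  else ' '

def convert_to_brainfuck_alt (parsed : String) : String :=
  String.mk ((PySem.List.enumerate parsed.toList 0).map (fun p => pvStepB p.1 p.2))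

-- ===== PRECONDITION & SPEC =====
def Spec_convert_to_brainfuck (parsed : String) (out : String) : Prop := out = convert_to_brainfuck_alt parsed
instance (parsed : String) (out : String) : Decidable (Spec_convert_to_brainfuck parsed out) := by unfold Spec_convert_to_brainfuck; infer_instance

-- ===== CLAIM (what is proved, stated in full; the proofs are below) =====
def Claim_equal_convert_to_brainfuck : Prop := ∀ (parsed : String), Dom_convert_to_brainfuck parsed → Spec_convert_to_brainfuck parsed (convert_to_brainfuck parsed)

-- ===== LEMMAS AND PROOFS =====

-- decrement moves one step along the cycle
theorem pv_dec_cyc : ∀ j : Fin 8, decrement (pvCycle.getD j.val ' ') = pvCycle.getD ((j.val + 1) % 8) ' ' := by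
  decide

-- a character outside the cycle decrements to ' '
theorem pv_dec_not_cyc (c : Char) (h : c ∉ pvCycle) : decrement c = ' ' := by
  simp only [pvCycle, List.mem_cons, not_or, List.not_mem_nil] at h
  obtain ⟨h1, h2, h3, h4, h5, h6, h7, h8, -⟩ := h
  have hd : pvDecDict = PySem.Dict.mk [(']','['), ('[',','), (',','.'), ('.','-'),
      ('-','+'), ('+','<'), ('<','>'), ('>',']')] := by decide
  simp [decrement, hd, PySem.Dict.getD, beq_iff_eq, Ne.symm h1, Ne.symm h2, Ne.symm h3,
    Ne.symm h4, Ne.symm h5, Ne.symm h6, Ne.symm h7, Ne.symm h8, PySem.Dict.get?]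

-- ' ' stays ' '
theorem pv_applyDec_space (n : Nat) : pvApplyDec n ' ' = ' ' := by
  induction n with
  | zero => rfl
  | succ n ih =>
    have : decrement ' ' = ' ' := by decide
    simp [pvApplyDec, this, ih]

-- iterating decrement on a cycle character advances (j + n) mod 8
theorem pv_applyDec_cyc (n : Nat) : ∀ j : Nat, j < 8 →
    pvApplyDec n (pvCycle.getD j ' ') = pvCycle.getD ((j + n) % 8) ' ' := by
  induction n with
  | zero =>
    intro j hj
    have h0 : (j + 0) % 8 = j := by omega
    rw [h0]
    rfl
  | succ n ih =>
    intro j hj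
    have hd := pv_dec_cyc ⟨j, hj⟩
    have h1 : (j + 1) % 8 < 8 := by omega
    calc pvApplyDec (n + 1) (pvCycle.getD j ' ')
        = pvApplyDec n (decrement (pvCycle.getD j ' ')) := rfl
      _ = pvApplyDec n (pvCycle.getD ((j + 1) % 8) ' ') := by rw [hd]
      _ = pvCycle.getD (((j + 1) % 8 + n) % 8) ' ' := ih _ h1
      _ = pvCycle.getD ((j + (n + 1)) % 8) ' ' := by
          congr 1; omega

-- pointwise: A's repeated decrement equals B's cycle lookup
theorem pv_key (k : Nat) (c : Char) : pvApplyDec k c = pvStepB (k : Int) c := by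
  cases k with
  | zero => simp [pvApplyDec, pvStepB]
  | succ n =>
    have hk : ((n + 1 : Nat) : Int) ≠ 0 := by omega
    by_cases hc : c ∈ pvCycle
    · have hj : pvCycle.idxOf c < 8 := by
        have := List.idxOf_lt_length_of_mem hc
        simpa [pvCycle] using this
      have hcc : pvCycle.getD (pvCycle.idxOf c) ' ' = c := by
        rw [List.getD_eq_getElem _ _ (by simpa [pvCycle] using hj)]
        exact List.getElem_idxOf _
      rw [pvStepB, if_neg hk, if_pos hc]
      conv_lhs => rw [← hcc]
      rw [pv_applyDec_cyc (n + 1) _ hj]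
      have hm : PySem.Int.mod ((pvCycle.idxOf c : Int) + ((n + 1 : Nat) : Int)) 8
          = (((pvCycle.idxOf c + (n + 1)) % 8 : Nat) : Int) := by
        simp [PySem.Int.mod]
        rw [Int.fmod_eq_emod]
        simp
      rw [hm, PySem.List.pyGetD_natCast]
    · rw [pvStepB, if_neg hk, if_neg hc]
      show pvApplyDec n (decrement c) = ' '
      rw [pv_dec_not_cyc c hc]
      exact pv_applyDec_space n

-- the loop of A equals B's enumerate-map, for any start counter and accumulator
theorem pv_loop_eq (l : List Char) : ∀ (bf : List Char) (k : Nat),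
    pvLoopA l bf k = bf ++ (PySem.List.enumerate l (k : Int)).map (fun p => pvStepB p.1 p.2) := by
  induction l with
  | nil => intro bf k; simp [pvLoopA, PySem.List.enumerate_nil]
  | cons c rest ih =>
    intro bf k
    rw [pvLoopA, ih, PySem.List.enumerate_cons]
    have h1 : ((k + 1 : Nat) : Int) = (k : Int) + 1 := by push_cast; ring
    rw [h1, List.map_cons, List.append_assoc, List.singleton_append, pv_key k c]

-- ===== VERDICT (by name: the statement is the Claim_ definition above) =====
theorem convert_to_brainfuck_spec : Claim_equal_convert_to_brainfuck := by
  intro parsed _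
  unfold Spec_convert_to_brainfuck convert_to_brainfuck convert_to_brainfuck_alt
  rw [pv_loop_eq]
  simp
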